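-- pv_equiv track=rewrite | github.com/Cesio-138/dauphong-hydra | scripts/dauphong_crawler.py | _sort_downloads
-- ===== SOURCE A (Python) =====
-- from collections import defaultdict
--
-- def _sort_downloads(downloads):
--     """Group by title, sort each group by uploadDate desc, then flatten alphabetically."""
--     groups = defaultdict(list)
--     for d in downloads:
--         groups[d['title']].append(d)
--     result = []
--     for title in sorted(groups.keys(), key=str.casefold):
--         group = groups[title]
--         group.sort(key=lambda x: x.get('uploadDate') or '', reverse=True)
--         result.extend(group)
--     return result
-- ===== SOURCE B (Python) =====
-- def _sort_downloads(downloads):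
--     """Group by title, sort each group by uploadDate desc, then flatten alphabetically."""
--     first_appearance = {}
--     for i, d in enumerate(downloads):
--         first_appearance.setdefault(d['title'], i)
--     by_date = sorted(downloads, key=lambda x: x.get('uploadDate') or '', reverse=True)
--     return sorted(by_date, key=lambda x: (x['title'].casefold(), first_appearance[x['title']]))
-- ===== Notes on version B (the rewrite author's own statement) =====
-- stated objective: alternative
-- what changed: Replaces the defaultdict grouping with per-group in-place sorts by two global stable sorts: sort all downloads by uploadDate descending, then stably by the key (casefolded title, index of the title's first appearance), which reproduces the same contiguous title groups in the same order.
import Mathlib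
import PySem

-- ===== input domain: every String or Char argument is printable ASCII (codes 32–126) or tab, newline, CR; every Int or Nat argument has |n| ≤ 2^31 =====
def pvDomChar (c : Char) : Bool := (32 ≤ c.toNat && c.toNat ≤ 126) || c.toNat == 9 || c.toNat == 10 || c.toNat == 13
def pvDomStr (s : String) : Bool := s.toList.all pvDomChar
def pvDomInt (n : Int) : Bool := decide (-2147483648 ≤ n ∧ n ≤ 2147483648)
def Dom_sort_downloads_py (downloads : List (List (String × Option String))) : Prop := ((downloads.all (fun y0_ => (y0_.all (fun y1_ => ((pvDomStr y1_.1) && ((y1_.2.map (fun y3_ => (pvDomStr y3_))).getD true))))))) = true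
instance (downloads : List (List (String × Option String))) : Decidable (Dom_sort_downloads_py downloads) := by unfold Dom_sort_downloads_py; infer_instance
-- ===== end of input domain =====

-- B replaces A's dict-grouping with per-group sorts by two global stable sorts
-- (date descending, then (casefolded title, first-appearance index)); same return value on Pre_.
-- str.casefold is ported as PySem.Str.lower, exact on the ASCII domain Dom_ admits.

-- ===== PORT A =====
-- d['title'] when present and not None, else "" (such inputs are outside Pre_): first match in the assoc list
def pvTitle (d : List (String × Option String)) : String :=
  (Option.join ((d.find? (fun p => p.1 == "title")).map (·.2))).getD ""
-- d.get('uploadDate') or ''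
def pvDate (d : List (String × Option String)) : String :=
  (Option.join ((d.find? (fun p => p.1 == "uploadDate")).map (·.2))).getD ""

def sort_downloads_py (downloads : List (List (String × Option String))) : List (List (String × Option String)) :=
  let groups : PySem.Dict String (List (List (String × Option String))) :=
    downloads.foldl (fun g d => g.modify (pvTitle d) [] (fun l => l ++ [d])) PySem.Dict.empty
  (PySem.List.sorted groups.keys (fun t => PySem.Str.lower t) false).foldl
    (fun result t => result ++ PySem.List.sorted (groups.getD t []) (fun x => pvDate x) true) []

-- ===== PORT B =====
def sort_downloads_py_alt (downloads : List (List (String × Option String))) : List (List (String × Option String)) :=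
  let fa : PySem.Dict String Int :=
    (PySem.List.enumerate downloads 0).foldl (fun m p => m.setdefault (pvTitle p.2) p.1) PySem.Dict.empty
  let byDate := PySem.List.sorted downloads (fun x => pvDate x) true
  PySem.List.sorted2 byDate (fun x => PySem.Str.lower (pvTitle x)) (fun x => fa.getD (pvTitle x) 0) false

-- ===== PRECONDITION & SPEC =====
-- Pre_ excludes exactly the inputs where the Python A raises: a dict without a 'title' key
-- (KeyError) or with a None title (TypeError in str.casefold).
def Pre_sort_downloads_py (downloads : List (List (String × Option String))) : Prop :=
  ∀ d ∈ downloads, (Option.join ((d.find? (fun p => p.1 == "title")).map (·.2))).isSome = true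
instance (downloads : List (List (String × Option String))) : Decidable (Pre_sort_downloads_py downloads) := by unfold Pre_sort_downloads_py; infer_instance

def pvWitness_sort_downloads_py : (List (List (String × Option String))) :=
  [[("title", some "b"), ("uploadDate", some "2020")], [("title", some "A")]]

def Spec_sort_downloads_py (downloads : List (List (String × Option String))) (out : List (List (String × Option String))) : Prop := out = sort_downloads_py_alt downloads
instance (downloads : List (List (String × Option String))) (out : List (List (String × Option String))) : Decidable (Spec_sort_downloads_py downloads out) := by unfold Spec_sort_downloads_py; infer_instance

-- ===== CLAIM (what is proved, stated in full; the proofs are below) =====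
def Claim_equal_sort_downloads_py : Prop := ∀ (downloads : List (List (String × Option String))), Dom_sort_downloads_py downloads → Pre_sort_downloads_py downloads → Spec_sort_downloads_py downloads (sort_downloads_py downloads)

-- ===== LEMMAS AND PROOFS =====

-- the insertion-sort loop both ports' `sorted`/`sorted2` calls unfold to (PySem.List.sorted_eq_foldl_insertBy etc.)
def pvIsort {α : Type} (before : α → α → Bool) (xs : List α) : List α :=
  xs.foldl (fun acc x => PySem.List.insertBy before x acc) []

theorem pvInsertBy_cons {α : Type} (b : α → α → Bool) (x y : α) (ys : List α) :
    PySem.List.insertBy b x (y :: ys) = if b x y then x :: y :: ys else y :: PySem.List.insertBy b x ys := by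
  simp [PySem.List.insertBy]

theorem pvIsort_append {α : Type} (b : α → α → Bool) (xs : List α) (x : α) :
    pvIsort b (xs ++ [x]) = PySem.List.insertBy b x (pvIsort b xs) := by
  simp [pvIsort, List.foldl_append]

theorem pvInsertBy_perm {α : Type} (b : α → α → Bool) (x : α) (ys : List α) :
    (PySem.List.insertBy b x ys).Perm (x :: ys) := by
  induction ys with
  | nil => exact List.Perm.refl _
  | cons y t ih =>
    rw [pvInsertBy_cons]
    split
    · exact List.Perm.refl _
    · exact (List.Perm.cons y ih).trans (List.Perm.swap x y t)

theorem pvIsort_perm {α : Type} (b : α → α → Bool) (xs : List α) : (pvIsort b xs).Perm xs := by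
  induction xs using List.reverseRecOn with
  | nil => exact List.Perm.refl _
  | append_singleton xs x ih =>
    rw [pvIsort_append]
    exact ((pvInsertBy_perm b x (pvIsort b xs)).trans ((ih.cons x).trans (List.perm_append_singleton x xs).symm))

theorem pvMem_isort {α : Type} (b : α → α → Bool) (xs : List α) (y : α) : y ∈ pvIsort b xs ↔ y ∈ xs :=
  (pvIsort_perm b xs).mem_iff

theorem pvInsertBy_append_left {α : Type} (b : α → α → Bool) (x : α) (A B : List α)
    (h : ∀ a ∈ A, b x a = false) :
    PySem.List.insertBy b x (A ++ B) = A ++ PySem.List.insertBy b x B := by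
  induction A with
  | nil => rfl
  | cons a A ih =>
    rw [List.cons_append, pvInsertBy_cons, h a List.mem_cons_self, if_neg (by simp)]
    rw [List.cons_append, ih (fun a ha => h a (List.mem_cons_of_mem _ ha))]

theorem pvPeel {α : Type} (b : α → α → Bool) (P : α → Bool) (xs : List α)
    (h1 : ∀ x ∈ xs, ∀ y ∈ xs, P x = true → P y = true → b x y = false)
    (h2 : ∀ x ∈ xs, ∀ y ∈ xs, P x = true → P y = false → b x y = true ∧ b y x = false) :
    pvIsort b xs = xs.filter P ++ pvIsort b (xs.filter (fun x => !P x)) := by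
  induction xs using List.reverseRecOn with
  | nil => rfl
  | append_singleton xs x ih =>
    have hmem : ∀ z ∈ xs, z ∈ xs ++ [x] := fun z hz => List.mem_append_left _ hz
    have hx : x ∈ xs ++ [x] := List.mem_append_right _ List.mem_cons_self
    have ih' := ih (fun a ha y hy => h1 a (hmem a ha) y (hmem y hy))
      (fun a ha y hy => h2 a (hmem a ha) y (hmem y hy))
    rw [pvIsort_append, ih']
    by_cases hPx : P x = true
    · have hleft : ∀ a ∈ xs.filter P, b x a = false := by
        intro a ha
        exact h1 x hx a (hmem a (List.mem_of_mem_filter ha)) hPx (List.of_mem_filter ha)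
      rw [pvInsertBy_append_left b x _ _ hleft]
      have hfP : (xs ++ [x]).filter P = xs.filter P ++ [x] := by
        simp [List.filter_append, hPx]
      have hfNP : (xs ++ [x]).filter (fun x => !P x) = xs.filter (fun x => !P x) := by
        simp [List.filter_append, hPx]
      rw [hfP, hfNP, List.append_assoc, List.singleton_append]
      congr 1
      cases hS : pvIsort b (xs.filter (fun x => !P x)) with
      | nil => rfl
      | cons z zs =>
        have hz : z ∈ pvIsort b (xs.filter (fun x => !P x)) := by rw [hS]; exact List.mem_cons_self
        rw [pvMem_isort] at hz
        have hzx := h2 x hx z (hmem z (List.mem_of_mem_filter hz)) hPx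
          (by have := List.of_mem_filter hz; simpa using this)
        rw [pvInsertBy_cons, if_pos hzx.1]
    · have hPx' : P x = false := by simpa using hPx
      have hleft : ∀ a ∈ xs.filter P, b x a = false := by
        intro a ha
        exact (h2 a (hmem a (List.mem_of_mem_filter ha)) x hx (List.of_mem_filter ha) hPx').2
      rw [pvInsertBy_append_left b x _ _ hleft, ← pvIsort_append]
      have hfP : (xs ++ [x]).filter P = xs.filter P := by
        simp [List.filter_append, hPx']
      have hfNP : (xs ++ [x]).filter (fun x => !P x) = xs.filter (fun x => !P x) ++ [x] := by
        simp [List.filter_append, hPx']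
      rw [hfP, hfNP]

theorem pvGroupsRank {α : Type} (b : α → α → Bool) (n : Nat) (ρ : α → Nat) (xs : List α)
    (hb : ∀ x ∈ xs, ∀ y ∈ xs, b x y = decide (ρ x < ρ y))
    (hlt : ∀ x ∈ xs, ρ x < n) :
    pvIsort b xs = (List.range n).flatMap (fun i => xs.filter (fun x => ρ x == i)) := by
  induction n generalizing xs ρ with
  | zero =>
    cases xs with
    | nil => rfl
    | cons x t => exact absurd (hlt x List.mem_cons_self) (Nat.not_lt_zero _)
  | succ n ih =>
    have hpeel := pvPeel b (fun x => ρ x == 0) xs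
      (by
        intro x hx y hy hpx hpy
        rw [hb x hx y hy]
        simp only [beq_iff_eq] at hpx hpy
        simp [hpx, hpy])
      (by
        intro x hx y hy hpx hpy
        rw [hb x hx y hy, hb y hy x hx]
        have h1 : ρ x = 0 := by simpa using hpx
        have h2 : ρ y ≠ 0 := by simpa using hpy
        refine ⟨by simp [h1]; omega, by simp [h1]⟩)
    rw [hpeel]
    have hmemf : ∀ x ∈ xs.filter (fun x => !(ρ x == 0)), ρ x ≠ 0 := by
      intro x hx
      have := List.of_mem_filter hx
      simpa using this
    have ihres := ih (fun x => ρ x - 1) (xs.filter (fun x => !(ρ x == 0)))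
      (by
        intro x hx y hy
        rw [hb x (List.mem_of_mem_filter hx) y (List.mem_of_mem_filter hy)]
        have hx0 := hmemf x hx
        have hy0 := hmemf y hy
        simp only [decide_eq_decide]
        omega)
      (by
        intro x hx
        have h1 := hlt x (List.mem_of_mem_filter hx)
        have h2 := hmemf x hx
        simp only []
        omega)
    rw [ihres, List.range_succ_eq_map, List.flatMap_cons, List.flatMap_map]
    congr 1
    apply List.flatMap_congr
    intro i _
    rw [List.filter_filter]
    apply List.filter_congr
    intro x _
    show ((ρ x - 1 == i) && !(ρ x == 0)) = (ρ x == Nat.succ i)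
    by_cases h0 : ρ x = 0
    · simp [h0]
    · by_cases hi : ρ x = i + 1
      · simp [hi]
      · have h1 : (ρ x - 1 == i) = false := by simp; omega
        have h2 : (ρ x == Nat.succ i) = false := by simp; omega
        simp [h1, h2]

theorem pvIsortPairwise {α : Type} (b : α → α → Bool) (xs : List α)
    (htr : ∀ x y z, b x y = true → b y z = true → b x z = true)
    (hirr : ∀ x, b x x = false) :
    (pvIsort b xs).Pairwise (fun a c => b c a = false) := by
  have hins : ∀ (x : α) (L : List α), L.Pairwise (fun a c => b c a = false) →
      (PySem.List.insertBy b x L).Pairwise (fun a c => b c a = false) := by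
    intro x L hL
    induction L with
    | nil => simp [PySem.List.insertBy]
    | cons y t ih =>
      rw [pvInsertBy_cons]
      rcases List.pairwise_cons.mp hL with ⟨hy, ht⟩
      by_cases hxy : b x y = true
      · rw [if_pos hxy]
        apply List.pairwise_cons.mpr
        refine ⟨?_, hL⟩
        intro c hc
        rcases hc with _ | hc
        · by_contra hbx
          have hbx' : b y x = true := by
            cases h : b y x
            · exact absurd h hbx
            · rfl
          exact absurd (htr x y x hxy hbx') (by simp [hirr x])
        · by_contra hcx
          have hcx' : b c x = true := by
            cases h : b c x
            · exact absurd h hcx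
            · rfl
          have := htr c x y hcx' hxy
          rename_i hc'
          exact absurd this (by simp [hy c hc'])
      · rw [if_neg hxy]
        apply List.pairwise_cons.mpr
        refine ⟨?_, ih ht⟩
        intro c hc
        rw [PySem.List.mem_insertBy] at hc
        rcases hc with rfl | hc
        · simpa using hxy
        · exact hy c hc
  induction xs using List.reverseRecOn with
  | nil => exact List.Pairwise.nil
  | append_singleton xs x ih =>
    rw [pvIsort_append]
    exact hins x _ ih

theorem pvFilterInsertBy {α : Type} (b : α → α → Bool) (p : α → Bool) (x : α) (L : List α)
    (hneg : ∀ x y z, b x y = true → b z y = false → b x z = true)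
    (hL : L.Pairwise (fun a c => b c a = false)) :
    (PySem.List.insertBy b x L).filter p =
      if p x then PySem.List.insertBy b x (L.filter p) else L.filter p := by
  induction L with
  | nil =>
    cases hpx : p x
    · simp [PySem.List.insertBy, hpx]
    · simp [PySem.List.insertBy, hpx]
  | cons y t ih =>
    rcases List.pairwise_cons.mp hL with ⟨hy, ht⟩
    rw [pvInsertBy_cons]
    by_cases hxy : b x y = true
    · rw [if_pos hxy]
      cases hpx : p x
      · simp [hpx]
      · cases hpy : p y
        · simp only [List.filter_cons, hpx, hpy, if_neg (by simp : ¬ (false = true))]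
          cases hft : t.filter p with
          | nil => simp [PySem.List.insertBy]
          | cons z zs =>
            have hz : z ∈ t := List.mem_of_mem_filter (by rw [hft]; exact List.mem_cons_self)
            have hbxz : b x z = true := hneg x y z hxy (hy z hz)
            rw [pvInsertBy_cons, if_pos hbxz]
        · simp only [List.filter_cons, hpx, hpy, if_true]
          rw [pvInsertBy_cons, if_pos hxy]
    · have hxy' : b x y = false := by
        cases h : b x y
        · rfl
        · exact absurd h hxy
      rw [if_neg hxy]
      cases hpy : p y
      · simp only [List.filter_cons, hpy, if_neg (by simp : ¬ (false = true))]
        rw [ih ht]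
      · simp only [List.filter_cons, hpy]
        rw [ih ht]
        cases hpx : p x
        · simp
        · simp only [if_true]
          rw [pvInsertBy_cons, if_neg (by simp [hxy'])]

theorem pvFilterIsort {α : Type} (b : α → α → Bool) (p : α → Bool) (xs : List α)
    (htr : ∀ x y z, b x y = true → b y z = true → b x z = true)
    (hirr : ∀ x, b x x = false)
    (hneg : ∀ x y z, b x y = true → b z y = false → b x z = true) :
    (pvIsort b xs).filter p = pvIsort b (xs.filter p) := by
  induction xs using List.reverseRecOn with
  | nil => rfl
  | append_singleton xs x ih =>
    rw [pvIsort_append, pvFilterInsertBy b p x _ hneg (pvIsortPairwise b xs htr hirr), ih]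
    cases hpx : p x with
    | true =>
      rw [List.filter_append]
      simp only [List.filter_cons, hpx, List.filter_nil, if_true]
      rw [pvIsort_append]
    | false =>
      rw [List.filter_append]
      simp [hpx]

theorem pvFlatMapRangeIdxOf {α κ : Type} [BEq κ] [LawfulBEq κ] (ck : α → κ) (L : List κ) (S : List α)
    (hnd : L.Nodup) (hcov : ∀ x ∈ S, ck x ∈ L) :
    (List.range L.length).flatMap (fun i => S.filter (fun x => L.idxOf (ck x) == i)) =
      L.flatMap (fun t => S.filter (fun x => ck x == t)) := by
  induction L generalizing S with
  | nil => simp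
  | cons t L ih =>
    rcases List.nodup_cons.mp hnd with ⟨htL, hndL⟩
    rw [List.length_cons, List.range_succ_eq_map, List.flatMap_cons, List.flatMap_cons, List.flatMap_map]
    congr 1
    · apply List.filter_congr
      intro x _
      rw [List.idxOf_cons]
      cases h : t == ck x with
      | true =>
        simp only [cond_true]
        have : ck x = t := (beq_iff_eq.mp h).symm
        simp [this]
      | false =>
        simp only [cond_false]
        have hne : ¬ (ck x = t) := fun he => by simp [he] at h
        simp [hne]
    · have step : ∀ i, S.filter (fun x => List.idxOf (ck x) (t :: L) == Nat.succ i) =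
          (S.filter (fun x => !(ck x == t))).filter (fun x => L.idxOf (ck x) == i) := by
        intro i
        rw [List.filter_filter]
        apply List.filter_congr
        intro x _
        rw [List.idxOf_cons]
        cases h : t == ck x with
        | true =>
          simp only [cond_true]
          have he : ck x = t := (beq_iff_eq.mp h).symm
          simp [he]
        | false =>
          simp only [cond_false]
          have hne : ¬ (ck x = t) := fun he => by simp [he] at h
          simp [hne]
      have hrw : (List.range L.length).flatMap
            (fun i => S.filter (fun x => List.idxOf (ck x) (t :: L) == Nat.succ i)) =
          (List.range L.length).flatMap
            (fun i => (S.filter (fun x => !(ck x == t))).filter (fun x => L.idxOf (ck x) == i)) := by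
        apply List.flatMap_congr
        intro i _
        exact step i
      rw [hrw, ih (S.filter (fun x => !(ck x == t))) hndL ?hcov]
      case hcov =>
        intro x hx
        have hx1 := List.mem_of_mem_filter hx
        have hx2 := List.of_mem_filter hx
        have := hcov x hx1
        rcases List.mem_cons.mp this with he | hm
        · exact absurd he (by simpa using hx2)
        · exact hm
      apply List.flatMap_congr
      intro u hu
      rw [List.filter_filter]
      apply List.filter_congr
      intro x _
      have hut : u ≠ t := fun he => htL (he ▸ hu)
      cases h : ck x == u with
      | true =>
        have : ck x = u := beq_iff_eq.mp h
        simp [this, hut]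
      | false => simp

theorem pvPairwiseIdxOf {κ : Type} [BEq κ] [LawfulBEq κ] (R : κ → κ → Prop) (L : List κ)
    (hpw : L.Pairwise R) (a c : κ) (ha : a ∈ L) (hc : c ∈ L)
    (hij : L.idxOf a < L.idxOf c) : R a c := by
  have h1 : L.idxOf a < L.length := List.idxOf_lt_length_of_mem ha
  have h2 : L.idxOf c < L.length := List.idxOf_lt_length_of_mem hc
  have := List.pairwise_iff_getElem.mp hpw (L.idxOf a) (L.idxOf c) h1 h2 hij
  rwa [List.getElem_idxOf, List.getElem_idxOf] at this

theorem pvIdxOfLtIff {κ : Type} [BEq κ] [LawfulBEq κ] [LinearOrder κ] (L : List κ)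
    (hpw : L.Pairwise (· < ·)) (a c : κ) (ha : a ∈ L) (hc : c ∈ L) :
    L.idxOf a < L.idxOf c ↔ a < c := by
  constructor
  · exact pvPairwiseIdxOf _ L hpw a c ha hc
  · intro hac
    rcases Nat.lt_trichotomy (L.idxOf a) (L.idxOf c) with h | h | h
    · exact h
    · have : a = c := (List.idxOf_inj ha).mp h
      exact absurd hac (by simp [this])
    · have := pvPairwiseIdxOf _ L hpw c a hc ha h
      exact absurd hac (not_lt_of_gt this)

theorem pvOfListPairwiseIdxOf {κ : Type} [BEq κ] [LawfulBEq κ] (l : List κ) :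
    (PySem.Set.ofList l).Pairwise (fun a c => l.idxOf a < l.idxOf c) := by
  induction l using List.reverseRecOn with
  | nil => simp [PySem.Set.ofList_eq_foldl]
  | append_singleton l x ih =>
    have hof : PySem.Set.ofList (l ++ [x]) = PySem.Set.add (PySem.Set.ofList l) x := by
      simp [PySem.Set.ofList_eq_foldl]
    rw [hof]
    have hmem : ∀ a ∈ PySem.Set.ofList l, a ∈ l := fun a ha => (PySem.Set.mem_ofList l a).mp ha
    have hidx : ∀ a ∈ PySem.Set.ofList l, (l ++ [x]).idxOf a = l.idxOf a := by
      intro a ha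
      rw [List.idxOf_append, if_pos (hmem a ha)]
    show (PySem.Set.add (PySem.Set.ofList l) x).Pairwise (fun a c => (l ++ [x]).idxOf a < (l ++ [x]).idxOf c)
    by_cases hx : PySem.Set.contains (PySem.Set.ofList l) x = true
    · rw [PySem.Set.add, if_pos hx]
      apply List.Pairwise.imp_of_mem ?_ ih
      intro a c ha hc h
      rw [hidx a ha, hidx c hc]
      exact h
    · rw [PySem.Set.add, if_neg hx]
      have hxl : x ∉ l := by
        intro hxl
        apply hx
        have : x ∈ PySem.Set.ofList l := (PySem.Set.mem_ofList l x).mpr hxl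
        simpa [PySem.Set.contains, List.contains_iff_mem] using this
      rw [List.pairwise_append]
      refine ⟨?_, by simp, ?_⟩
      · apply List.Pairwise.imp_of_mem ?_ ih
        intro a c ha hc h
        rw [hidx a ha, hidx c hc]
        exact h
      · intro a ha c hc
        rcases List.mem_singleton.mp hc with rfl
        rw [hidx a ha, List.idxOf_append, if_neg hxl]
        have h1 : l.idxOf a < l.length := List.idxOf_lt_length_of_mem (hmem a ha)
        omega

theorem pvFaGeneral (l : List (List (String × Option String))) (s : Int)
    (m : PySem.Dict String Int) (t : String) (d : Int) :
    ((PySem.List.enumerate l s).foldl (fun m p => m.setdefault (pvTitle p.2) p.1) m).getD t d =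
      if m.contains t then m.getD t d
      else if t ∈ l.map pvTitle then s + ((l.map pvTitle).idxOf t : Int) else d := by
  induction l generalizing s m with
  | nil =>
    simp only [PySem.List.enumerate, List.foldl_nil, List.map_nil, List.not_mem_nil, if_false]
    split
    · rfl
    · rename_i h
      exact PySem.Dict.getD_of_not_contains m d (by simpa using h)
  | cons x l ih =>
    have henum : PySem.List.enumerate (x :: l) s = (s, x) :: PySem.List.enumerate l (s + 1) := by
      simp [PySem.List.enumerate]
    rw [henum, List.foldl_cons, ih]
    by_cases hmt : m.contains t = true
    · have h1 : (m.setdefault (pvTitle x) s).contains t = true := by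
        rw [PySem.Dict.contains_setdefault]
        simp [hmt]
      rw [if_pos h1, if_pos hmt]
      by_cases hteq : t = pvTitle x
      · subst hteq
        rw [PySem.Dict.setdefault_of_contains m s hmt]
      · rw [PySem.Dict.getD_eq_get?_getD, PySem.Dict.get?_setdefault_of_ne m s hteq,
          ← PySem.Dict.getD_eq_get?_getD]
    · by_cases hteq : t = pvTitle x
      · subst hteq
        have hnc : m.contains (pvTitle x) = false := by simpa using hmt
        rw [PySem.Dict.setdefault_of_not_contains m s hnc]
        have h1 : (m.insert (pvTitle x) s).contains (pvTitle x) = true := by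
          rw [PySem.Dict.contains_insert]; simp
        rw [if_pos h1, if_neg hmt, PySem.Dict.getD_insert, if_pos rfl]
        rw [if_pos (by rw [List.map_cons]; exact List.mem_cons_self)]
        rw [List.map_cons, List.idxOf_cons]
        simp
      · have h1 : (m.setdefault (pvTitle x) s).contains t = m.contains t := by
          rw [PySem.Dict.contains_setdefault]
          have hbe : (t == pvTitle x) = false := by simpa using hteq
          simp [hbe]
        rw [h1, if_neg hmt, if_neg hmt]
        have hidx : ((x :: l).map pvTitle).idxOf t = ((l.map pvTitle).idxOf t) + 1 := by
          rw [List.map_cons, List.idxOf_cons]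
          have hbe : (pvTitle x == t) = false := by
            simp only [beq_eq_false_iff_ne, ne_eq]
            exact fun he => hteq he.symm
          simp [hbe]
        by_cases hml : t ∈ l.map pvTitle
        · rw [if_pos hml, if_pos (by rw [List.map_cons]; exact List.mem_cons_of_mem _ hml), hidx]
          push_cast
          ring
        · rw [if_neg hml, if_neg (by
            rw [List.map_cons]
            intro hc
            rcases List.mem_cons.mp hc with he | hm
            · exact hteq he
            · exact hml hm)]

-- title / date orders used by both ports
def pvBD (x y : List (String × Option String)) : Bool := decide (pvDate y < pvDate x)

def pvT (downloads : List (List (String × Option String))) : List String :=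
  PySem.List.sorted (PySem.Set.ofList (downloads.map pvTitle)) (fun t => PySem.Str.lower t) false

theorem pvGroupsGetD (downloads : List (List (String × Option String))) (t : String) :
    (downloads.foldl (fun g d => g.modify (pvTitle d) [] (fun l => l ++ [d])) PySem.Dict.empty).getD t []
      = downloads.filter (fun d => pvTitle d == t) := by
  have h1 : downloads.foldl (fun g d => g.modify (pvTitle d) [] (fun l => l ++ [d])) PySem.Dict.empty
      = (downloads.map (fun d => (pvTitle d, d))).foldl
          (fun g p => g.modify p.1 [] (fun l => l ++ [p.2])) PySem.Dict.empty := by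
    rw [List.foldl_map]
  rw [h1, PySem.Dict.getD_foldl_modify_append, PySem.Dict.getD_empty, List.filter_map]
  simp [List.map_map, Function.comp_def]

theorem pvGroupsKeys (downloads : List (List (String × Option String))) :
    (downloads.foldl (fun g d => g.modify (pvTitle d) [] (fun l => l ++ [d])) PySem.Dict.empty).keys
      = PySem.Set.ofList (downloads.map pvTitle) := by
  rw [PySem.Dict.keys_foldl_modify_key downloads pvTitle [] (fun _ d => (fun l => l ++ [d])) PySem.Dict.empty,
    PySem.Dict.keys_empty, PySem.Set.ofList_eq_foldl]
  rfl

theorem pvAeq (downloads : List (List (String × Option String))) :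
    sort_downloads_py downloads
      = (pvT downloads).flatMap (fun t => pvIsort pvBD (downloads.filter (fun d => pvTitle d == t))) := by
  show (PySem.List.sorted
      (downloads.foldl (fun g d => g.modify (pvTitle d) [] (fun l => l ++ [d])) PySem.Dict.empty).keys
      (fun t => PySem.Str.lower t) false).foldl
      (fun result t => result ++ PySem.List.sorted
        ((downloads.foldl (fun g d => g.modify (pvTitle d) [] (fun l => l ++ [d])) PySem.Dict.empty).getD t [])
        (fun x => pvDate x) true) [] = _
  rw [PySem.List.foldl_append_eq_flatMap, List.nil_append, pvGroupsKeys]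
  apply List.flatMap_congr
  intro t _
  rw [pvGroupsGetD, PySem.List.sorted_rev_eq_foldl_insertBy]
  rfl

theorem pvTNodup (downloads : List (List (String × Option String))) : (pvT downloads).Nodup :=
  ((PySem.List.sorted_perm _ _ _).nodup_iff).mpr (PySem.Set.nodup_ofList _)

theorem pvMemT (downloads : List (List (String × Option String))) (d : List (String × Option String))
    (hd : d ∈ downloads) : pvTitle d ∈ pvT downloads := by
  rw [pvT, PySem.List.mem_sorted, PySem.Set.mem_ofList]
  exact List.mem_map_of_mem hd

theorem pvTPairwise (downloads : List (List (String × Option String))) :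
    (pvT downloads).Pairwise (fun u v => PySem.Str.lower u < PySem.Str.lower v ∨
      (PySem.Str.lower u = PySem.Str.lower v ∧
        (downloads.map pvTitle).idxOf u < (downloads.map pvTitle).idxOf v)) := by
  have hCpl : (PySem.List.sorted
      (PySem.Set.ofList ((PySem.Set.ofList (downloads.map pvTitle)).map (fun t => PySem.Str.lower t)))
      (fun c => c) false).Pairwise (· < ·) := PySem.List.sorted_ofList_pairwise_lt _
  set titles := downloads.map pvTitle with htitles
  set DT := PySem.Set.ofList titles with hDT
  set C := PySem.List.sorted (PySem.Set.ofList (DT.map (fun t => PySem.Str.lower t))) (fun c => c) false with hC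
  have hmemC : ∀ u ∈ DT, PySem.Str.lower u ∈ C := by
    intro u hu
    rw [hC, PySem.List.mem_sorted, PySem.Set.mem_ofList]
    exact List.mem_map_of_mem hu
  have hT : pvT downloads = pvIsort (fun u v => decide (PySem.Str.lower u < PySem.Str.lower v)) DT :=
    PySem.List.sorted_eq_foldl_insertBy DT _
  have hrk := pvGroupsRank (fun u v => decide (PySem.Str.lower u < PySem.Str.lower v)) C.length
      (fun u => C.idxOf (PySem.Str.lower u)) DT
      (by
        intro u hu v hv
        simp only [decide_eq_decide]
        exact (pvIdxOfLtIff C hCpl _ _ (hmemC u hu) (hmemC v hv)).symm)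
      (by intro u hu; exact List.idxOf_lt_length_of_mem (hmemC u hu))
  rw [hT, hrk]
  rw [List.pairwise_flatMap]
  constructor
  · intro i _
    have hpw : (DT.filter (fun u => C.idxOf (PySem.Str.lower u) == i)).Pairwise
        (fun a c => titles.idxOf a < titles.idxOf c) :=
      List.Pairwise.sublist List.filter_sublist (pvOfListPairwiseIdxOf titles)
    apply List.Pairwise.imp_of_mem ?_ hpw
    intro u v hu hv hidx
    have hiu : C.idxOf (PySem.Str.lower u) = i := by
      have := List.of_mem_filter hu; simpa using this
    have hiv : C.idxOf (PySem.Str.lower v) = i := by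
      have := List.of_mem_filter hv; simpa using this
    have hmu : u ∈ DT := List.mem_of_mem_filter hu
    have hlow : PySem.Str.lower u = PySem.Str.lower v :=
      (List.idxOf_inj (hmemC u hmu)).mp (hiu.trans hiv.symm)
    exact Or.inr ⟨hlow, hidx⟩
  · apply List.Pairwise.imp ?_ List.pairwise_lt_range
    intro i j hij u hu v hv
    have hiu : C.idxOf (PySem.Str.lower u) = i := by
      have := List.of_mem_filter hu; simpa using this
    have hiv : C.idxOf (PySem.Str.lower v) = j := by
      have := List.of_mem_filter hv; simpa using this
    have hmu : u ∈ DT := List.mem_of_mem_filter hu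
    have hmv : v ∈ DT := List.mem_of_mem_filter hv
    left
    exact (pvIdxOfLtIff C hCpl _ _ (hmemC u hmu) (hmemC v hmv)).mp (by omega)

theorem pvFaGetD (downloads : List (List (String × Option String))) (u : String)
    (hu : u ∈ downloads.map pvTitle) :
    ((PySem.List.enumerate downloads 0).foldl (fun m p => m.setdefault (pvTitle p.2) p.1)
      PySem.Dict.empty).getD u 0 = ((downloads.map pvTitle).idxOf u : Int) := by
  rw [pvFaGeneral downloads 0 PySem.Dict.empty u 0]
  rw [if_neg (by simp [PySem.Dict.contains_empty]), if_pos hu]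
  ring

theorem pvBeq (downloads : List (List (String × Option String))) :
    sort_downloads_py_alt downloads
      = (pvT downloads).flatMap (fun t => pvIsort pvBD (downloads.filter (fun d => pvTitle d == t))) := by
  have hB : sort_downloads_py_alt downloads = pvIsort
      (fun x y => decide (PySem.Str.lower (pvTitle x) < PySem.Str.lower (pvTitle y)) ||
        (!decide (PySem.Str.lower (pvTitle y) < PySem.Str.lower (pvTitle x)) &&
          decide (((PySem.List.enumerate downloads 0).foldl
              (fun m p => m.setdefault (pvTitle p.2) p.1) PySem.Dict.empty).getD (pvTitle x) 0 <
            ((PySem.List.enumerate downloads 0).foldl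
              (fun m p => m.setdefault (pvTitle p.2) p.1) PySem.Dict.empty).getD (pvTitle y) 0)))
      (PySem.List.sorted downloads (fun x => pvDate x) true) := rfl
  rw [hB]
  have hmemS : ∀ x ∈ PySem.List.sorted downloads (fun x => pvDate x) true, x ∈ downloads := by
    intro x hx
    exact (PySem.List.mem_sorted _ _ _ _).mp hx
  have hrk := pvGroupsRank
      (fun x y => decide (PySem.Str.lower (pvTitle x) < PySem.Str.lower (pvTitle y)) ||
        (!decide (PySem.Str.lower (pvTitle y) < PySem.Str.lower (pvTitle x)) &&
          decide (((PySem.List.enumerate downloads 0).foldl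
              (fun m p => m.setdefault (pvTitle p.2) p.1) PySem.Dict.empty).getD (pvTitle x) 0 <
            ((PySem.List.enumerate downloads 0).foldl
              (fun m p => m.setdefault (pvTitle p.2) p.1) PySem.Dict.empty).getD (pvTitle y) 0)))
      (pvT downloads).length
      (fun x => (pvT downloads).idxOf (pvTitle x))
      (PySem.List.sorted downloads (fun x => pvDate x) true)
      ?hb ?hlt
  case hlt =>
    intro x hx
    exact List.idxOf_lt_length_of_mem (pvMemT downloads x (hmemS x hx))
  case hb =>
    intro x hx y hy
    have hdx : x ∈ downloads := hmemS x hx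
    have hdy : y ∈ downloads := hmemS y hy
    have htx : pvTitle x ∈ pvT downloads := pvMemT downloads x hdx
    have hty : pvTitle y ∈ pvT downloads := pvMemT downloads y hdy
    have hfx := pvFaGetD downloads (pvTitle x) (List.mem_map_of_mem hdx)
    have hfy := pvFaGetD downloads (pvTitle y) (List.mem_map_of_mem hdy)
    simp only [hfx, hfy]
    rcases Nat.lt_trichotomy ((pvT downloads).idxOf (pvTitle x)) ((pvT downloads).idxOf (pvTitle y))
      with hlt | heq | hgt
    · have hR := pvPairwiseIdxOf _ (pvT downloads) (pvTPairwise downloads) _ _ htx hty hlt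
      rcases hR with hl | ⟨hleq, hidx⟩
      · simp [hl, hlt]
      · simp [hlt, hleq, Int.ofNat_lt.mpr hidx]
    · have hteq : pvTitle x = pvTitle y := (List.idxOf_inj htx).mp heq
      simp [hteq]
    · have hR := pvPairwiseIdxOf _ (pvT downloads) (pvTPairwise downloads) _ _ hty htx hgt
      have hnlt : ¬ ((pvT downloads).idxOf (pvTitle x) < (pvT downloads).idxOf (pvTitle y)) := by omega
      rcases hR with hl | ⟨hleq, hidx⟩
      · simp [hl, asymm hl, hnlt]
      · have h3 : ¬ ((downloads.map pvTitle).idxOf (pvTitle x) : Int) <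
            ((downloads.map pvTitle).idxOf (pvTitle y) : Int) := by
          omega
        simp [hleq, h3, hnlt]
  rw [hrk]
  rw [pvFlatMapRangeIdxOf pvTitle (pvT downloads) _ (pvTNodup downloads)
    (fun x hx => pvMemT downloads x (hmemS x hx))]
  apply List.flatMap_congr
  intro t _
  have hS : PySem.List.sorted downloads (fun x => pvDate x) true = pvIsort pvBD downloads :=
    PySem.List.sorted_rev_eq_foldl_insertBy downloads _
  rw [hS, pvFilterIsort pvBD _ downloads
    (by intro x y z h1 h2; simp only [pvBD, decide_eq_true_eq] at *; exact lt_trans h2 h1)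
    (by intro x; simp [pvBD])
    (by intro x y z h1 h2; simp only [pvBD, decide_eq_true_eq, decide_eq_false_iff_not] at *
        exact lt_of_le_of_lt (not_lt.mp h2) h1)]

theorem pvMainEquiv (downloads : List (List (String × Option String))) :
    sort_downloads_py downloads = sort_downloads_py_alt downloads := by
  rw [pvAeq, pvBeq]

-- ===== VERDICT (by name: the statement is the Claim_ definition above) =====
theorem sort_downloads_py_spec : Claim_equal_sort_downloads_py := by
  intro downloads _ _
  unfold Spec_sort_downloads_py
  exact pvMainEquiv downloads
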